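-- pv_equiv track=rewrite | github.com/leoncini/Algoritmi_di_crittografia-2019 | challenge3.py | GroupFreq
-- ===== SOURCE A (Python) =====
-- def GroupFreq(text, alphabet, g=2):
--     '''Returns a dictionary with the frequencies of all the
--        groups of g letters belonging to the alphabet
--     '''
--     D = {}
--     l = len(text)
--     i = 0
--     while i < l-g+1:
--         j = 0
--         while j<g and text[i+j] in alphabet:
--             j += 1
--         if j == g:
--             if not D.get(text[i:i+g],False):
--                 D[text[i:i+g]] = 1
--             else:
--                 D[text[i:i+g]] += 1
--             i += 1
--         else:
--             i = i+j+1
--     return D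
-- ===== SOURCE B (Python) =====
-- def GroupFreq(text, alphabet, g=2):
--     '''Returns a dictionary with the frequencies of all the
--        groups of g letters belonging to the alphabet
--     '''
--     groups = [text[i:i + g] for i in range(len(text) - g + 1)
--               if len(text[i:i + g]) == g and all(c in alphabet for c in text[i:i + g])]
--     D = {}
--     for w in groups:
--         D[w] = D.get(w, 0) + 1
--     return D
-- ===== Notes on version B (the rewrite author's own statement) =====
-- stated objective: simpler
-- what changed: Replaces A's index-jumping while-loop with nested validation/skip logic and a two-way dict update by a two-phase decomposition: a comprehension collects every full window whose characters all lie in the alphabet, then a single dict.get tally loop counts them.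
import Mathlib
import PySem

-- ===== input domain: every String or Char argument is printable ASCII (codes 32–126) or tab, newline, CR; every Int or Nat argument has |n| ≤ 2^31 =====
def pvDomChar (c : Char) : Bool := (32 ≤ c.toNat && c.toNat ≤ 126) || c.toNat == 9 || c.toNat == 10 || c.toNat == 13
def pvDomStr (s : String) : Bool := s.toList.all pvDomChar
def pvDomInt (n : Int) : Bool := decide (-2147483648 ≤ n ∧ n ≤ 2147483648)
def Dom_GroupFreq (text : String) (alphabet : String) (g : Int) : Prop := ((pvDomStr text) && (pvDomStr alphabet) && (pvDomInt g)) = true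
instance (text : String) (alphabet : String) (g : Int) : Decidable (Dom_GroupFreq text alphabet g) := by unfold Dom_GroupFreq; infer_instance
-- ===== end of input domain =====

-- B replaces A's skip-ahead while-loop by a two-phase decomposition (collect valid windows, then tally); objective: simpler, same exact dict (value and insertion order).

-- ===== PORT A =====
-- inner while loop: 'j = 0; while j < g and text[i+j] in alphabet: j += 1'
-- (the 'none' branch is Python's IndexError; A's outer loop only calls this with 0 ≤ i < l-g+1, where every read is in range, so it is never taken)
def pvInnerA (cs alpha : List Char) (g i j : Int) : Int :=
  if h : j < g then
    match PySem.List.pyGet? cs (i + j) with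
    | some c => if PySem.Chars.isIn [c] alpha then pvInnerA cs alpha g i (j + 1) else j
    | none => j
  else j
termination_by (g - j).toNat

theorem pvInnerA_ge (cs alpha : List Char) (g i : Int) : ∀ j, j ≤ pvInnerA cs alpha g i j := by
  intro j
  induction j using pvInnerA.induct cs alpha g i with
  | case1 j h c hc hin ih => rw [pvInnerA, dif_pos h, hc]; dsimp only; rw [if_pos hin]; omega
  | case2 j h c hc hin => rw [pvInnerA, dif_pos h, hc]; dsimp only; rw [if_neg hin]
  | case3 j h hc => rw [pvInnerA, dif_pos h, hc]
  | case4 j h => rw [pvInnerA, dif_neg h]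

-- outer while loop of A, with the dict update 'if not D.get(k, False): D[k] = 1 else: D[k] += 1'
def pvOuterA (cs alpha : List Char) (l g i : Int) (D : PySem.Dict String Int) : PySem.Dict String Int :=
  if h : i < l - g + 1 then
    let j := pvInnerA cs alpha g i 0
    if j = g then
      let key := String.ofList (PySem.List.slice cs (some i) (some (i + g)))
      let D' := if D.getD key 0 = 0 then D.insert key 1 else D.insert key (D.getD key 0 + 1)
      pvOuterA cs alpha l g (i + 1) D'
    else pvOuterA cs alpha l g (i + j + 1) D
  else D
termination_by (l - g + 1 - i).toNat
decreasing_by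
  · omega
  · have := pvInnerA_ge cs alpha g i 0; omega

def GroupFreq (text : String) (alphabet : String) (g : Int) : List (String × Int) :=
  (pvOuterA text.toList alphabet.toList (text.toList.length : Int) g 0 PySem.Dict.empty).items

-- ===== PORT B =====
-- the comprehension's condition: 'len(text[i:i+g]) == g and all(c in alphabet for c in text[i:i+g])'
def pvValidB (cs alpha : List Char) (g i : Int) : Bool :=
  decide (PySem.List.len (PySem.List.slice cs (some i) (some (i + g))) = g) &&
    (PySem.List.slice cs (some i) (some (i + g))).all (fun c => PySem.Chars.isIn [c] alpha)

def GroupFreq_alt (text : String) (alphabet : String) (g : Int) : List (String × Int) :=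
  let cs := text.toList
  let groups := ((PySem.List.pyRange 0 (PySem.List.len cs - g + 1) 1).filter
      (fun i => pvValidB cs alphabet.toList g i)).map
      (fun i => String.ofList (PySem.List.slice cs (some i) (some (i + g))))
  (groups.foldl (fun D w => D.insert w (D.getD w 0 + 1)) PySem.Dict.empty).items

-- ===== PRECONDITION & SPEC =====
def Spec_GroupFreq (text : String) (alphabet : String) (g : Int) (out : List (String × Int)) : Prop := out = GroupFreq_alt text alphabet g
instance (text : String) (alphabet : String) (g : Int) (out : List (String × Int)) : Decidable (Spec_GroupFreq text alphabet g out) := by unfold Spec_GroupFreq; infer_instance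

-- ===== CLAIM (what is proved, stated in full; the proofs are below) =====
def Claim_equal_GroupFreq : Prop := ∀ (text : String) (alphabet : String) (g : Int), Dom_GroupFreq text alphabet g → Spec_GroupFreq text alphabet g (GroupFreq text alphabet g)

-- ===== LEMMAS AND PROOFS =====

-- 'position p of cs holds a character of the alphabet'
def pvGoodPos (cs alpha : List Char) (p : Int) : Prop :=
  ∃ c, PySem.List.pyGet? cs p = some c ∧ PySem.Chars.isIn [c] alpha = true

-- the valid windows from start position i upward, in order
def pvValidFrom (cs alpha : List Char) (l g i : Int) : List String :=
  if h : i < l - g + 1 then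
    (if pvValidB cs alpha g i then
      [String.ofList (PySem.List.slice cs (some i) (some (i + g)))] else []) ++
    pvValidFrom cs alpha l g (i + 1)
  else []
termination_by (l - g + 1 - i).toNat

theorem pvInnerA_le (cs alpha : List Char) (g i : Int) :
    ∀ j, j ≤ g → pvInnerA cs alpha g i j ≤ g := by
  intro j
  induction j using pvInnerA.induct cs alpha g i with
  | case1 j h c hc hin ih => intro _; rw [pvInnerA, dif_pos h, hc]; dsimp only; rw [if_pos hin]; exact ih (by omega)
  | case2 j h c hc hin => intro hj; rw [pvInnerA, dif_pos h, hc]; dsimp only; rw [if_neg hin]; exact hj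
  | case3 j h hc => intro hj; rw [pvInnerA, dif_pos h, hc]; exact hj
  | case4 j h => intro hj; rw [pvInnerA, dif_neg h]; exact hj

theorem pvInnerA_good (cs alpha : List Char) (g i : Int) :
    ∀ j t, j ≤ t → t < pvInnerA cs alpha g i j → pvGoodPos cs alpha (i + t) := by
  intro j
  induction j using pvInnerA.induct cs alpha g i with
  | case1 j h c hc hin ih =>
      intro t ht htr
      rw [pvInnerA, dif_pos h, hc] at htr; dsimp only at htr; rw [if_pos hin] at htr
      rcases eq_or_lt_of_le ht with rfl | hlt
      · exact ⟨c, hc, hin⟩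
      · exact ih t (by omega) htr
  | case2 j h c hc hin => intro t ht htr; rw [pvInnerA, dif_pos h, hc] at htr; dsimp only at htr; rw [if_neg hin] at htr; omega
  | case3 j h hc => intro t ht htr; rw [pvInnerA, dif_pos h, hc] at htr; dsimp only at htr; omega
  | case4 j h => intro t ht htr; rw [pvInnerA, dif_neg h] at htr; omega

theorem pvInnerA_bad (cs alpha : List Char) (g i : Int) :
    ∀ j, pvInnerA cs alpha g i j < g → ¬ pvGoodPos cs alpha (i + pvInnerA cs alpha g i j) := by
  intro j
  induction j using pvInnerA.induct cs alpha g i with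
  | case1 j h c hc hin ih => rw [pvInnerA, dif_pos h, hc]; dsimp only; rw [if_pos hin]; exact ih
  | case2 j h c hc hin =>
      rw [pvInnerA, dif_pos h, hc]; dsimp only; rw [if_neg hin]
      rintro _ ⟨c', hc', hin'⟩
      rw [hc'] at hc; injection hc with hcc; subst hcc; exact hin hin'
  | case3 j h hc =>
      rw [pvInnerA, dif_pos h, hc]
      rintro _ ⟨c', hc', _⟩
      rw [hc'] at hc; cases hc
  | case4 j h => rw [pvInnerA, dif_neg h]; intro hlt; omega

theorem pvValidB_iff (cs alpha : List Char) (g i : Int)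
    (hi : 0 ≤ i) (hg : 0 ≤ g) (hig : i + g ≤ (cs.length : Int)) :
    (pvValidB cs alpha g i = true ↔ ∀ t, 0 ≤ t → t < g → pvGoodPos cs alpha (i + t)) := by
  have hS : PySem.List.slice cs (some i) (some (i + g)) = List.take g.toNat (List.drop i.toNat cs) := by
    rw [PySem.List.slice_toNat cs hi (by omega)]
    congr 1
    omega
  have hlen : (List.take g.toNat (List.drop i.toNat cs)).length = g.toNat := by
    rw [List.length_take, List.length_drop]
    omega
  have hget : ∀ (t : ℕ) (ht : t < g.toNat),
      (List.take g.toNat (List.drop i.toNat cs))[t]'(by omega) = cs[i.toNat + t]'(by omega) := by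
    intro t ht
    rw [List.getElem_take, List.getElem_drop]
  unfold pvValidB
  rw [hS]
  simp only [PySem.List.len_eq, hlen, Bool.and_eq_true, decide_eq_true_eq, List.all_eq_true]
  constructor
  · rintro ⟨-, hall⟩ t ht htg
    have htn : t.toNat < g.toNat := by omega
    refine ⟨cs[i.toNat + t.toNat]'(by omega), ?_, ?_⟩
    · rw [PySem.List.pyGet?_eq_some_getElem cs (i := i + t) (by omega) (by omega)]
      simp only [show (i + t).toNat = i.toNat + t.toNat by omega]
    · have hmem : cs[i.toNat + t.toNat]'(by omega) ∈ List.take g.toNat (List.drop i.toNat cs) := by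
        rw [← hget t.toNat htn]
        exact List.getElem_mem _
      exact hall _ hmem
  · intro hall
    refine ⟨by omega, ?_⟩
    intro c hc
    obtain ⟨t, htl, hct⟩ := List.getElem_of_mem hc
    rw [hlen] at htl
    obtain ⟨c', hg', hin'⟩ := hall (t : Int) (by omega) (by omega)
    rw [PySem.List.pyGet?_eq_some_getElem cs (i := i + (t : Int)) (by omega) (by omega)] at hg'
    injection hg' with hg'
    rw [← hct, hget t htl]
    have hidx : i.toNat + t = (i + (t : Int)).toNat := by omega
    simp only [hidx]
    rw [hg']
    exact hin'

theorem pvValidB_false_of_neg (cs alpha : List Char) (g i : Int) (hg : g < 0) :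
    pvValidB cs alpha g i = false := by
  have hlen : (0:Int) ≤ (PySem.List.slice cs (some i) (some (i + g))).length := by positivity
  simp only [pvValidB, PySem.List.len_eq, Bool.and_eq_false_iff, decide_eq_false_iff_not]
  left
  omega

theorem pvValidFrom_skip (cs alpha : List Char) (l g : Int) :
    ∀ (n : ℕ) (i m : Int), (m - i).toNat ≤ n → i ≤ m →
      (∀ k, i ≤ k → k < m → k < l - g + 1 → pvValidB cs alpha g k = false) →
      pvValidFrom cs alpha l g i = pvValidFrom cs alpha l g m := by
  intro n
  induction n with
  | zero =>
      intro i m hn him _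
      have : i = m := by omega
      rw [this]
  | succ n ih =>
      intro i m hn him hall
      rcases eq_or_lt_of_le him with rfl | hlt
      · rfl
      · by_cases hi : i < l - g + 1
        · rw [pvValidFrom, dif_pos hi, if_neg (by simp [hall i le_rfl hlt hi]), List.nil_append]
          exact ih (i + 1) m (by omega) (by omega) (fun k hk1 hk2 hk3 => hall k (by omega) hk2 hk3)
        · rw [pvValidFrom, dif_neg hi, pvValidFrom, dif_neg (by omega)]

theorem pvGroupsB_eq (cs alpha : List Char) (l g : Int) (hl : l = (cs.length : Int)) :
    ∀ (n : ℕ) (i : Int), (l - g + 1 - i).toNat ≤ n →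
      ((PySem.List.pyRange i (l - g + 1) 1).filter (fun k => pvValidB cs alpha g k)).map
        (fun k => String.ofList (PySem.List.slice cs (some k) (some (k + g)))) =
      pvValidFrom cs alpha l g i := by
  intro n
  induction n with
  | zero =>
      intro i hn
      rw [PySem.List.pyRange_one_eq_nil (by omega), pvValidFrom, dif_neg (by omega)]
      rfl
  | succ n ih =>
      intro i hn
      by_cases hi : i < l - g + 1
      · rw [PySem.List.pyRange_one_cons hi, pvValidFrom, dif_pos hi]
        rw [List.filter_cons]
        by_cases hv : pvValidB cs alpha g i
        · rw [if_pos (by simp [hv]), List.map_cons, if_pos hv, ih (i + 1) (by omega)]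
          rfl
        · rw [if_neg (by simp [hv]), if_neg hv, List.nil_append, ih (i + 1) (by omega)]
      · rw [PySem.List.pyRange_one_eq_nil (by omega), pvValidFrom, dif_neg hi]
        rfl

theorem pvOuterA_eq (cs alpha : List Char) (g : Int) :
    ∀ (n : ℕ) (i : Int) (D : PySem.Dict String Int),
      ((cs.length : Int) - g + 1 - i).toNat ≤ n → 0 ≤ i →
      pvOuterA cs alpha (cs.length : Int) g i D =
        (pvValidFrom cs alpha (cs.length : Int) g i).foldl
          (fun D w => D.insert w (D.getD w 0 + 1)) D := by
  intro n
  induction n with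
  | zero =>
      intro i D hn hi
      rw [pvOuterA, dif_neg (by omega), pvValidFrom, dif_neg (by omega)]
      rfl
  | succ n ih =>
      intro i D hn hi
      by_cases hlt : i < (cs.length : Int) - g + 1
      · rw [pvOuterA, dif_pos hlt]
        dsimp only
        by_cases hjg : pvInnerA cs alpha g i 0 = g
        · rw [if_pos hjg]
          have hg0 : 0 ≤ g := by have := pvInnerA_ge cs alpha g i 0; omega
          have hvalid : pvValidB cs alpha g i = true := by
            rw [pvValidB_iff cs alpha g i hi hg0 (by omega)]
            intro t ht htg
            exact pvInnerA_good cs alpha g i 0 t ht (by rw [hjg]; exact htg)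
          rw [pvValidFrom, dif_pos hlt, if_pos hvalid, List.singleton_append, List.foldl_cons]
          rw [ih (i + 1) _ (by omega) (by omega)]
          congr 1
          split_ifs with h0
          · rw [h0]; norm_num
          · rfl
        · rw [if_neg hjg]
          have hj0 : 0 ≤ pvInnerA cs alpha g i 0 := pvInnerA_ge cs alpha g i 0
          by_cases hgpos : 0 ≤ g
          · have hjlt : pvInnerA cs alpha g i 0 < g :=
              lt_of_le_of_ne (pvInnerA_le cs alpha g i 0 hgpos) hjg
            have hbad : ¬ pvGoodPos cs alpha (i + pvInnerA cs alpha g i 0) :=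
              pvInnerA_bad cs alpha g i 0 hjlt
            have hfalse : ∀ k, i ≤ k → k < i + pvInnerA cs alpha g i 0 + 1 →
                k < (cs.length : Int) - g + 1 → pvValidB cs alpha g k = false := by
              intro k hk1 hk2 hk3
              by_contra hvk
              have hvk' : pvValidB cs alpha g k = true := by
                revert hvk; cases pvValidB cs alpha g k <;> simp
              rw [pvValidB_iff cs alpha g k (by omega) hgpos (by omega)] at hvk'
              have hgd := hvk' (i + pvInnerA cs alpha g i 0 - k) (by omega) (by omega)
              rw [show k + (i + pvInnerA cs alpha g i 0 - k) = i + pvInnerA cs alpha g i 0 by ring] at hgd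
              exact hbad hgd
            rw [pvValidFrom_skip cs alpha (cs.length : Int) g
                  (i + pvInnerA cs alpha g i 0 + 1 - i).toNat i (i + pvInnerA cs alpha g i 0 + 1)
                  le_rfl (by omega) hfalse]
            exact ih (i + pvInnerA cs alpha g i 0 + 1) D (by omega) (by omega)
          · have hjz : pvInnerA cs alpha g i 0 = 0 := by
              rw [pvInnerA, dif_neg (by omega)]
            rw [pvValidFrom_skip cs alpha (cs.length : Int) g 1 i (i + 1) (by omega) (by omega)
                  (fun k _ _ _ => pvValidB_false_of_neg cs alpha g k (by omega))]
            rw [hjz, show i + 0 + 1 = i + 1 by ring]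
            exact ih (i + 1) D (by omega) (by omega)
      · rw [pvOuterA, dif_neg hlt, pvValidFrom, dif_neg hlt]
        rfl

-- ===== VERDICT (by name: the statement is the Claim_ definition above) =====
theorem GroupFreq_spec : Claim_equal_GroupFreq := by
  intro text alphabet g _
  unfold Spec_GroupFreq GroupFreq GroupFreq_alt
  rw [pvOuterA_eq text.toList alphabet.toList g _ 0 _ le_rfl (by omega)]
  simp only [PySem.List.len_eq]
  rw [pvGroupsB_eq text.toList alphabet.toList _ g rfl _ 0 le_rfl]
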